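-- pv_equiv track=rewrite | github.com/nalsaadi/15-112 | Project.py | chunk_list
-- ===== SOURCE A (Python) =====
-- def chunk_list(b):
--     M = []
--     x = 0
--     for i in range (0, len(b),32):
--         m = b[i:i+32]
--         x = 0
--         for y in range(0,len(m)):
--             x = x + ord(m[y])
--         M.append(x)
--     return M
-- ===== SOURCE B (Python) =====
-- def chunk_list(b):
--     res = [0] * ((len(b) + 31) // 32)
--     for i, ch in enumerate(b):
--         res[i // 32] += ord(ch)
--     return res
-- ===== Notes on version B (the rewrite author's own statement) =====
-- stated objective: alternative
-- what changed: A re-slices the string into 32-char chunks and sums each chunk with a nested index loop; B preallocates a zeroed result of length ceil(len(b)/32) and makes one flat enumerate pass, adding each ord(ch) into bucket i//32.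
import Mathlib
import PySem

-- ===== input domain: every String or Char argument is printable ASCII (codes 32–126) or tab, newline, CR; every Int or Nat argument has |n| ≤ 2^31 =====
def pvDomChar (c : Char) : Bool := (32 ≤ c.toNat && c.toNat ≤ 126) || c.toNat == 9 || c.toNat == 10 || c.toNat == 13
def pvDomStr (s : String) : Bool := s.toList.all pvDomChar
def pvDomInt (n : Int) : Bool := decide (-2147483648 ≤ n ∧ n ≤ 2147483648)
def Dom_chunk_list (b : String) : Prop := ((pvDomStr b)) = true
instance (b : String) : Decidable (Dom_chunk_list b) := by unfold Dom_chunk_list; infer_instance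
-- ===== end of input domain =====

-- B replaces A's chunk-slicing with nested sum loops by a preallocated zero list of
-- length ceil(len(b)/32) filled in one flat enumerate pass (alternative decomposition, same O(n) cost).

-- ===== PORT A =====
def chunk_list (b : String) : List Int :=
  let s := b.toList
  (PySem.List.pyRange 0 (PySem.List.len s) 32).foldl
    (fun M i =>
      let m := PySem.List.slice s (some i) (some (i + 32))
      -- x = 0; for y in range(len(m)): x += ord(m[y])   (y is always in range, so pyGetD's default is never used)
      let x : Int := (PySem.List.pyRange 0 (PySem.List.len m)).foldl
        (fun x y => x + ((PySem.List.pyGetD m y ' ').toNat : Int)) 0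
      M ++ [x]) []

-- ===== PORT B =====
def chunk_list_alt (b : String) : List Int :=
  let s := b.toList
  let res := List.replicate ((s.length + 31) / 32) (0 : Int)
  -- for i, ch in enumerate(b): res[i//32] += ord(ch)   (i ≥ 0, so .toNat of the floordiv is exact;
  -- the index is always < len(res), so getD's default / set's out-of-range noop are never used)
  (PySem.List.enumerate s).foldl
    (fun res ic =>
      let k := (PySem.Int.floordiv ic.1 32).toNat
      res.set k (res.getD k 0 + (ic.2.toNat : Int)))
    res

-- ===== PRECONDITION & SPEC =====
def Spec_chunk_list (b : String) (out : List Int) : Prop := out = chunk_list_alt b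
instance (b : String) (out : List Int) : Decidable (Spec_chunk_list b out) := by unfold Spec_chunk_list; infer_instance

-- ===== CLAIM (what is proved, stated in full; the proofs are below) =====
def Claim_equal_chunk_list : Prop := ∀ (b : String), Dom_chunk_list b → Spec_chunk_list b (chunk_list b)

-- ===== LEMMAS AND PROOFS =====

-- proof-only helpers: the per-chunk character-code sum, and the common normal form of both ports
def sumOrd (l : List Char) : Int := l.foldl (fun x c => x + (c.toNat : Int)) 0

def chunksTarget (s : List Char) : List Int :=
  (List.range ((s.length + 31) / 32)).map (fun k => sumOrd ((s.drop (32 * k)).take 32))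

theorem sumOrd_append_singleton (l : List Char) (c : Char) :
    sumOrd (l ++ [c]) = sumOrd l + (c.toNat : Int) := by
  simp [sumOrd, List.foldl_append]

theorem floordiv_natCast_toNat (n : ℕ) : (PySem.Int.floordiv (n : ℤ) 32).toNat = n / 32 := by
  simp [PySem.Int.floordiv, Int.fdiv_eq_ediv]; omega

-- appending one character only changes the bucket of index (length t) / 32, at its end
theorem bucket_append (t : List Char) (c : Char) (k : ℕ) :
    (((t ++ [c]).drop (32 * k)).take 32)
      = if k = t.length / 32 then ((t.drop (32 * k)).take 32) ++ [c]
        else (t.drop (32 * k)).take 32 := by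
  split_ifs with hk
  · subst hk
    have h1 : 32 * (t.length / 32) ≤ t.length := Nat.mul_div_le _ _
    rw [List.drop_append_of_le_length h1]
    have h2 : (t.drop (32 * (t.length / 32))).length ≤ 32 := by
      rw [List.length_drop]; omega
    rw [List.take_of_length_le h2, List.take_of_length_le (by simp; omega)]
  · rcases Nat.lt_or_ge k (t.length / 32) with hlt | hge
    · have h1 : 32 * k + 32 ≤ t.length := by omega
      rw [List.drop_append_of_le_length (by omega)]
      exact List.take_append_of_le_length (by rw [List.length_drop]; omega)
    · have hgt : t.length / 32 < k := lt_of_le_of_ne hge (Ne.symm hk)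
      have h1 : t.length < 32 * k := by omega
      rw [List.drop_of_length_le (l := t ++ [c]) (by simp; omega),
          List.drop_of_length_le (by omega)]

-- the invariant of B's flat pass
theorem fold_inv (t : List Char) (res0 : List Int) (h : t.length ≤ 32 * res0.length) :
    (PySem.List.enumerate t).foldl
      (fun res ic =>
        let k := (PySem.Int.floordiv ic.1 32).toNat
        res.set k (res.getD k 0 + (ic.2.toNat : Int))) res0
      = res0.mapIdx (fun k v => v + sumOrd ((t.drop (32 * k)).take 32)) := by
  induction t using List.reverseRecOn with
  | nil =>
    simp only [PySem.List.enumerate_nil, List.foldl_nil, List.drop_nil, List.take_nil]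
    simp [sumOrd]
    apply List.ext_getElem <;> simp
  | append_singleton t' c ih =>
    have h' : t'.length ≤ 32 * res0.length := by simp at h; omega
    rw [PySem.List.enumerate_append, List.foldl_append, ih h']
    rw [PySem.List.enumerate_cons, PySem.List.enumerate_nil]
    simp only [List.foldl_cons, List.foldl_nil, zero_add, floordiv_natCast_toNat]
    have hl : t'.length + 1 ≤ 32 * res0.length := by simpa using h
    have hk : t'.length / 32 < res0.length := by omega
    apply List.ext_getElem
    · simp
    · intro i hi1 hi2
      have hil : i < res0.length := by simpa using hi1
      rw [List.getElem_set]
      by_cases hik : t'.length / 32 = i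
      · subst hik
        rw [if_pos rfl]
        have : (res0.mapIdx (fun k v => v + sumOrd ((t'.drop (32 * k)).take 32))).getD (t'.length / 32) 0
            = res0[t'.length / 32] + sumOrd ((t'.drop (32 * (t'.length / 32))).take 32) := by
          rw [List.getD_eq_getElem _ _ (by simpa using hk)]
          exact List.getElem_mapIdx
        rw [this, List.getElem_mapIdx, bucket_append, if_pos rfl, sumOrd_append_singleton]
        ring
      · rw [if_neg hik, List.getElem_mapIdx, List.getElem_mapIdx, bucket_append,
            if_neg (fun he => hik (by omega))]

theorem chunk_list_alt_eq (b : String) : chunk_list_alt b = chunksTarget b.toList := by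
  unfold chunk_list_alt
  rw [fold_inv _ _ (by simp; omega)]
  apply List.ext_getElem
  · simp [chunksTarget]
  · intro i hi1 hi2
    rw [List.getElem_mapIdx]
    simp [chunksTarget]

theorem chunk_list_eq (b : String) : chunk_list b = chunksTarget b.toList := by
  unfold chunk_list
  simp only []
  have hinner : ∀ m : List Char,
      (PySem.List.pyRange 0 (PySem.List.len m)).foldl
        (fun x y => x + ((PySem.List.pyGetD m y ' ').toNat : Int)) 0 = sumOrd m := by
    intro m
    exact PySem.List.foldl_pyRange_zero_pyGetD m ' ' (fun x c => x + (c.toNat : Int)) 0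
  calc (PySem.List.pyRange 0 (PySem.List.len b.toList) 32).foldl
        (fun M i =>
          M ++ [(PySem.List.pyRange 0 (PySem.List.len (PySem.List.slice b.toList (some i) (some (i + 32))))).foldl
            (fun x y => x + ((PySem.List.pyGetD (PySem.List.slice b.toList (some i) (some (i + 32))) y ' ').toNat : Int)) 0]) []
      = (PySem.List.pyRange 0 (PySem.List.len b.toList) 32).map
          (fun i => sumOrd (PySem.List.slice b.toList (some i) (some (i + 32)))) := by
        rw [show (fun (M : List Int) (i : Int) =>
          M ++ [(PySem.List.pyRange 0 (PySem.List.len (PySem.List.slice b.toList (some i) (some (i + 32))))).foldl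
            (fun x y => x + ((PySem.List.pyGetD (PySem.List.slice b.toList (some i) (some (i + 32))) y ' ').toNat : Int)) 0])
          = fun M i => M ++ [sumOrd (PySem.List.slice b.toList (some i) (some (i + 32)))] from
            funext fun M => funext fun i => by rw [hinner]]
        exact PySem.List.foldl_append_singleton_eq_map _ _ []
    _ = chunksTarget b.toList := by
        rw [PySem.List.pyRange_of_pos 0 (PySem.List.len b.toList) (by norm_num)]
        rw [List.map_map]
        unfold chunksTarget
        have hcnt : (if (0:ℤ) < PySem.List.len b.toList
              then ((PySem.List.len b.toList - 0 + 32 - 1) / 32).toNat else 0)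
            = (b.toList.length + 31) / 32 := by
          simp only [PySem.List.len]
          split_ifs with h <;> omega
        rw [hcnt]
        apply List.map_congr_left
        intro k _
        simp only [Function.comp]
        have : (0 : ℤ) + 32 * (k : ℤ) = ((32 * k : ℕ) : ℤ) := by push_cast; ring
        rw [this]
        have : ((32 * k : ℕ) : ℤ) + 32 = ((32 * k : ℕ) : ℤ) + ((32 : ℕ) : ℤ) := by norm_num
        rw [this, PySem.List.slice_natCast_add]

-- ===== VERDICT (by name: the statement is the Claim_ definition above) =====
theorem chunk_list_spec : Claim_equal_chunk_list := by
  intro b _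
  unfold Spec_chunk_list
  rw [chunk_list_eq, chunk_list_alt_eq]
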